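-- pv_equiv track=rewrite | github.com/DominikWojtanowski/Matura-informatyka | 2014 - Maj/Zadanie 1/zadanie_1.py | KoraleBids
-- ===== SOURCE A (Python) =====
-- def KoraleBids(n: int):
--     koral = ''
--     while n != 1:
--         if n % 2 == 0:
--             koral = '⚪-' + koral
--             n //= 2
--         elif n % 2 == 1:
--             koral = '⚫-' + koral
--             n = (n-1)//2
--     koral = '-⚫-' + koral
--     return koral
-- ===== SOURCE B (Python) =====
-- def KoraleBids(n: int):
--     # recursive, MSB-first: append the low bit's bead after the recursive prefix
--     if n == 1:
--         return '-⚫-'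
--     return KoraleBids(n // 2) + ('⚫-' if n % 2 else '⚪-')
-- ===== Notes on version B (the rewrite author's own statement) =====
-- stated objective: alternative
-- what changed: Replaced A's iterative LSB-first loop that prepends each bead to an accumulator with a recursion on n//2 that appends the low bit's bead after the recursively built prefix.
import Mathlib
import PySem

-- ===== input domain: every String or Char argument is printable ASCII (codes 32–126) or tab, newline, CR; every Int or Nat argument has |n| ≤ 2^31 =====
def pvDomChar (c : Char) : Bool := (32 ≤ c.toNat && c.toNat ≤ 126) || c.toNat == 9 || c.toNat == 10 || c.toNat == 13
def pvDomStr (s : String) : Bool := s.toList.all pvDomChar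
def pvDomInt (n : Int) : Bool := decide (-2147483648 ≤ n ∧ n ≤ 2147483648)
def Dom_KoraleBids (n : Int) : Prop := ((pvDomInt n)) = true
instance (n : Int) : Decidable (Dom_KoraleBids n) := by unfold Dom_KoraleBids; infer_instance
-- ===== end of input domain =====

-- B replaces A's LSB-first prepend loop with an MSB-first recursion that appends each bead (alternative decomposition, same cost).

-- ===== PORT A =====
-- A's while loop; the fuel (n.toNat iterations are always enough for n ≥ 1) only makes the
-- recursion total — Python diverges for n < 1, which Pre_ excludes.
def KoraleBidsLoop (fuel : Nat) (n : Int) (koral : String) : String :=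
  match fuel with
  | 0 => koral
  | fuel + 1 =>
    if n = 1 then koral
    else if PySem.Int.mod n 2 = 0 then
      KoraleBidsLoop fuel (PySem.Int.floordiv n 2) ("⚪-" ++ koral)
    else
      KoraleBidsLoop fuel (PySem.Int.floordiv (n - 1) 2) ("⚫-" ++ koral)

def KoraleBids (n : Int) : String := "-⚫-" ++ KoraleBidsLoop n.toNat n ""

-- ===== PORT B =====
-- B's recursion, with the same totality fuel.
def KoraleBidsAltRec (fuel : Nat) (n : Int) : String :=
  match fuel with
  | 0 => "-⚫-"
  | fuel + 1 =>
    if n = 1 then "-⚫-"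
    else KoraleBidsAltRec fuel (PySem.Int.floordiv n 2) ++
      (if PySem.Int.mod n 2 ≠ 0 then "⚫-" else "⚪-")

def KoraleBids_alt (n : Int) : String := KoraleBidsAltRec n.toNat n

-- ===== PRECONDITION & SPEC =====
-- Pre_ excludes n < 1, where Python A loops forever (and B recurses forever): neither returns.
def Pre_KoraleBids (n : Int) : Prop := 1 ≤ n
instance (n : Int) : Decidable (Pre_KoraleBids n) := by unfold Pre_KoraleBids; infer_instance
def pvWitness_KoraleBids : Int := (6)

def Spec_KoraleBids (n : Int) (out : String) : Prop := out = KoraleBids_alt n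
instance (n : Int) (out : String) : Decidable (Spec_KoraleBids n out) := by unfold Spec_KoraleBids; infer_instance

-- ===== CLAIM (what is proved, stated in full; the proofs are below) =====
def Claim_equal_KoraleBids : Prop := ∀ (n : Int), Dom_KoraleBids n → Pre_KoraleBids n → Spec_KoraleBids n (KoraleBids n)

-- ===== LEMMAS AND PROOFS =====
theorem korale_key (f : Nat) : ∀ (n : Int), 1 ≤ n → n.toNat ≤ f →
    ∀ k, "-⚫-" ++ KoraleBidsLoop f n k = KoraleBidsAltRec f n ++ k := by
  induction f with
  | zero => intro n hn hf; omega
  | succ g ih =>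
    intro n hn hf k
    by_cases h1 : n = 1
    · subst h1
      rw [KoraleBidsLoop, KoraleBidsAltRec]
      simp
    · have hhalf : PySem.Int.floordiv n 2 = n / 2 := PySem.Int.floordiv_eq_ediv_of_pos (by omega)
      have hrec1 : 1 ≤ PySem.Int.floordiv n 2 := by omega
      have hrecf : (PySem.Int.floordiv n 2).toNat ≤ g := by omega
      rw [KoraleBidsLoop, KoraleBidsAltRec]
      simp only [if_neg h1]
      by_cases hm : PySem.Int.mod n 2 = 0
      · rw [if_pos hm, ih (PySem.Int.floordiv n 2) hrec1 hrecf ("⚪-" ++ k)]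
        have hb : (if PySem.Int.mod n 2 ≠ 0 then "⚫-" else "⚪-") = "⚪-" := if_neg (not_not.mpr hm)
        rw [hb, String.append_assoc]
      · have hodd : PySem.Int.floordiv (n - 1) 2 = PySem.Int.floordiv n 2 := by
          have he1 : PySem.Int.floordiv (n - 1) 2 = (n - 1) / 2 := PySem.Int.floordiv_eq_ediv_of_pos (by omega)
          have hme : PySem.Int.mod n 2 = n % 2 := PySem.Int.mod_eq_emod_of_pos (by omega)
          omega
        rw [if_neg hm, hodd, ih (PySem.Int.floordiv n 2) hrec1 hrecf ("⚫-" ++ k)]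
        have hb : (if PySem.Int.mod n 2 ≠ 0 then "⚫-" else "⚪-") = "⚫-" := if_pos hm
        rw [hb, String.append_assoc]

-- ===== VERDICT (by name: the statement is the Claim_ definition above) =====
theorem KoraleBids_spec : Claim_equal_KoraleBids := by
  intro n _ hn
  unfold Spec_KoraleBids KoraleBids KoraleBids_alt
  simpa using korale_key n.toNat n hn le_rfl ""
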